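-- pv_equiv track=rewrite | github.com/VickyA5/TP-Greedy-TDA | problema.py | problema_monedas
-- ===== SOURCE A (Python) =====
-- from collections import deque
--
-- def problema_monedas(fila):
--     sophia = []
--     mateo = []
--     esperados = []
--
--     fila = deque(fila)
--
--     while len(fila) > 0:
--         # Turno de Sophia
--         if fila[0] > fila[-1]:
--             sophia.append(fila[0])
--             fila.popleft()
--             esperados.append("Primera moneda para Sophia")
--         else:
--             sophia.append(fila[-1])
--             fila.pop()
--             esperados.append("Última moneda para Sophia")
--
--         if len(fila) == 0:
--             break
--
--         # Turno de Mateo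
--         if fila[0] > fila[-1]:
--             mateo.append(fila[-1])
--             fila.pop()
--             esperados.append("Última moneda para Mateo")
--         else:
--             mateo.append(fila[0])
--             fila.popleft()
--             esperados.append("Primera moneda para Mateo")
--
--     return sophia, mateo, esperados
-- ===== SOURCE B (Python) =====
-- def problema_monedas(fila):
--     sophia = []
--     mateo = []
--     esperados = []
--     i, j = 0, len(fila) - 1
--     turno_sophia = True
--     while i <= j:
--         left, right = fila[i], fila[j]
--         if turno_sophia:
--             if left > right:
--                 sophia.append(left)
--                 esperados.append("Primera moneda para Sophia")
--                 i += 1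
--             else:
--                 sophia.append(right)
--                 esperados.append("Última moneda para Sophia")
--                 j -= 1
--         else:
--             if left > right:
--                 mateo.append(right)
--                 esperados.append("Última moneda para Mateo")
--                 j -= 1
--             else:
--                 mateo.append(left)
--                 esperados.append("Primera moneda para Mateo")
--                 i += 1
--         turno_sophia = not turno_sophia
--     return sophia, mateo, esperados
-- ===== Notes on version B (the rewrite author's own statement) =====
-- stated objective: alternative
-- what changed: Replaces the deque with two indices into the untouched input list and a single one-coin-per-iteration loop with a turn toggle, instead of A's two-coins-per-iteration loop that mutates a deque and needs a mid-loop break.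
import Mathlib
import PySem

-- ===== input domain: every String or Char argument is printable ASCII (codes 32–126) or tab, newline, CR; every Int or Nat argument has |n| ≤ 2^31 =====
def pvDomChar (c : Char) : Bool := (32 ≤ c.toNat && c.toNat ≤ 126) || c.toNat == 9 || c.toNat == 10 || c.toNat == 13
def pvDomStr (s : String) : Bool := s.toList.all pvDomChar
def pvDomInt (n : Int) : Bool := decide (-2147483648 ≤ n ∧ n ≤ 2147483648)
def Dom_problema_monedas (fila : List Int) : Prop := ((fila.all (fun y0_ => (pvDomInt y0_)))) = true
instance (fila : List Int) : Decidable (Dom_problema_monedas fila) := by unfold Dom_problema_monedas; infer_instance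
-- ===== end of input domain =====

-- B replaces A's mutated deque and two-coins-per-iteration loop (with its mid-loop break) by two
-- indices into the untouched list and a single one-coin-per-iteration loop with a turn toggle.

-- ===== PORT A =====
-- A's while loop over the deque: each pass takes Sophia's coin, breaks if the deque became empty,
-- then takes Mateo's coin; popleft = tail, pop = dropLast; fila[0]/fila[-1] via PySem.List.pyGetD
-- (always in range here, the loop guard guarantees the deque is nonempty).
def problema_monedas (fila : List Int) : List Int × List Int × List String :=
  if _h : 0 < fila.length then
    let f0 := PySem.List.pyGetD fila 0 0
    let fl := PySem.List.pyGetD fila (-1) 0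
    let scoin := if f0 > fl then f0 else fl
    let smsg := if f0 > fl then "Primera moneda para Sophia" else "Última moneda para Sophia"
    let fila1 := if f0 > fl then fila.tail else fila.dropLast
    if _h2 : fila1.length = 0 then ([scoin], ([], [smsg]))
    else
      let g0 := PySem.List.pyGetD fila1 0 0
      let gl := PySem.List.pyGetD fila1 (-1) 0
      let mcoin := if g0 > gl then gl else g0
      let mmsg := if g0 > gl then "Última moneda para Mateo" else "Primera moneda para Mateo"
      let fila2 := if g0 > gl then fila1.dropLast else fila1.tail
      let r := problema_monedas fila2
      (scoin :: r.1, mcoin :: r.2.1, smsg :: mmsg :: r.2.2)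
  else ([], ([], []))
termination_by fila.length
decreasing_by
  split_ifs at * <;> simp_all [List.length_dropLast, List.length_tail] <;> omega

-- ===== PORT B =====
-- B's while i ≤ j loop: one coin per iteration, toggling whose turn it is; the appends to the
-- three accumulator lists become the conses onto the recursive result, in the same order.
def pvAltLoop (fila : List Int) (i j : Int) (turno : Bool) :
    List Int × List Int × List String :=
  if _h : i ≤ j then
    let left := PySem.List.pyGetD fila i 0
    let right := PySem.List.pyGetD fila j 0
    if turno then
      if left > right then
        let r := pvAltLoop fila (i+1) j false
        (left :: r.1, r.2.1, "Primera moneda para Sophia" :: r.2.2)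
      else
        let r := pvAltLoop fila i (j-1) false
        (right :: r.1, r.2.1, "Última moneda para Sophia" :: r.2.2)
    else
      if left > right then
        let r := pvAltLoop fila i (j-1) true
        (r.1, right :: r.2.1, "Última moneda para Mateo" :: r.2.2)
      else
        let r := pvAltLoop fila (i+1) j true
        (r.1, left :: r.2.1, "Primera moneda para Mateo" :: r.2.2)
  else ([], ([], []))
termination_by (j + 1 - i).toNat
decreasing_by all_goals omega

def problema_monedas_alt (fila : List Int) : List Int × List Int × List String :=
  pvAltLoop fila 0 (PySem.List.len fila - 1) true

-- ===== PRECONDITION & SPEC =====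
def Spec_problema_monedas (fila : List Int) (out : List Int × List Int × List String) : Prop := out = problema_monedas_alt fila
instance (fila : List Int) (out : List Int × List Int × List String) : Decidable (Spec_problema_monedas fila out) := by unfold Spec_problema_monedas; infer_instance

-- ===== CLAIM (what is proved, stated in full; the proofs are below) =====
def Claim_equal_problema_monedas : Prop := ∀ (fila : List Int), Dom_problema_monedas fila → Spec_problema_monedas fila (problema_monedas fila)

-- ===== LEMMAS AND PROOFS =====

-- The remaining deque of A, once B has advanced to indices i..j, is this segment of fila.
def pvSeg (fila : List Int) (i j : Int) : List Int :=
  (fila.drop i.toNat).take (j + 1 - i).toNat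

lemma pvSeg_length (fila : List Int) (i j : Int) (hi : 0 ≤ i) (hj : j < (fila.length : Int)) :
    (pvSeg fila i j).length = (j + 1 - i).toNat := by
  simp only [pvSeg, List.length_take, List.length_drop]
  omega

lemma pvSeg_head (fila : List Int) (i j : Int) (hi : 0 ≤ i) (hij : i ≤ j)
    (hj : j < (fila.length : Int)) :
    PySem.List.pyGetD (pvSeg fila i j) 0 0 = PySem.List.pyGetD fila i 0 := by
  have hlen := pvSeg_length fila i j hi hj
  rw [PySem.List.pyGetD_eq_getElem (pvSeg fila i j) 0 (by norm_num) (by omega),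
      PySem.List.pyGetD_eq_getElem fila 0 hi (by omega)]
  simp only [pvSeg, Int.toNat_zero, List.getElem_take, List.getElem_drop]
  simp

lemma pvSeg_last (fila : List Int) (i j : Int) (hi : 0 ≤ i) (hij : i ≤ j)
    (hj : j < (fila.length : Int)) :
    PySem.List.pyGetD (pvSeg fila i j) (-1) 0 = PySem.List.pyGetD fila j 0 := by
  have hlen := pvSeg_length fila i j hi hj
  rw [PySem.List.pyGetD_neg_ofNat (pvSeg fila i j) 1 0 (by norm_num) (by omega),
      PySem.List.pyGetD_eq_getElem fila 0 (le_trans hi hij) hj]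
  simp only [pvSeg, List.getElem_take, List.getElem_drop]
  congr 1
  simp only [List.length_take, List.length_drop] at *
  omega

lemma pvSeg_tail (fila : List Int) (i j : Int) (hi : 0 ≤ i) :
    (pvSeg fila i j).tail = pvSeg fila (i+1) j := by
  simp only [pvSeg, ← List.drop_one, List.drop_take, List.drop_drop]
  congr 1
  · omega
  · congr 1
    omega

lemma pvSeg_dropLast (fila : List Int) (i j : Int) (hi : 0 ≤ i) (hj : j < (fila.length : Int)) :
    (pvSeg fila i j).dropLast = pvSeg fila i (j-1) := by
  rw [List.dropLast_eq_take]
  simp only [pvSeg, List.length_take, List.length_drop, List.take_take]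
  congr 1
  omega

lemma pvSeg_eq_self (fila : List Int) : pvSeg fila 0 ((fila.length : Int) - 1) = fila := by
  simp only [pvSeg, Int.toNat_zero, List.drop_zero]
  rw [show ((fila.length : Int) - 1 + 1 - 0).toNat = fila.length by omega]
  exact List.take_length

-- Main bridge: A's loop on the remaining segment computes B's index loop (Sophia to move).
lemma pvBridge (fila : List Int) (i j : Int) (hi : 0 ≤ i) (hj : j < (fila.length : Int)) :
    problema_monedas (pvSeg fila i j) = pvAltLoop fila i j true := by
  by_cases hij : i ≤ j
  · have hlen := pvSeg_length fila i j hi hj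
    rw [problema_monedas.eq_def, pvAltLoop.eq_def]
    rw [dif_pos (by omega : 0 < (pvSeg fila i j).length), dif_pos hij]
    simp only [eq_self_iff_true, if_true, reduceIte]
    rw [pvSeg_head fila i j hi hij hj, pvSeg_last fila i j hi hij hj]
    set L := PySem.List.pyGetD fila i 0 with hL
    set R := PySem.List.pyGetD fila j 0 with hR
    by_cases hLR : L > R
    · -- Sophia takes the first coin; then L ≠ R forces i < j, so Mateo plays
      have hij' : i < j := by
        rcases lt_or_eq_of_le hij with h | h
        · exact h
        · exfalso; rw [hL, hR, h] at hLR; exact lt_irrefl _ hLR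
      simp only [if_pos hLR]
      rw [pvSeg_tail fila i j hi]
      have hlen2 := pvSeg_length fila (i+1) j (by omega) hj
      rw [dif_neg (by omega : ¬ (pvSeg fila (i+1) j).length = 0)]
      rw [pvSeg_head fila (i+1) j (by omega) (by omega) hj,
          pvSeg_last fila (i+1) j (by omega) (by omega) hj, ← hR]
      rw [pvAltLoop.eq_def, dif_pos (by omega : i + 1 ≤ j)]
      simp only [Bool.false_eq_true, if_false, ← hR]
      set L2 := PySem.List.pyGetD fila (i+1) 0 with hL2
      by_cases hLR2 : L2 > R
      · simp only [if_pos hLR2]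
        rw [pvSeg_dropLast fila (i+1) j (by omega) hj,
            pvBridge fila (i+1) (j-1) (by omega) (by omega)]
      · simp only [if_neg hLR2]
        rw [pvSeg_tail fila (i+1) j (by omega),
            pvBridge fila (i+1+1) j (by omega) hj]
    · -- Sophia takes the last coin
      simp only [if_neg hLR]
      rw [pvSeg_dropLast fila i j hi hj]
      by_cases hij2 : i ≤ j - 1
      · -- Mateo still plays
        have hlen2 := pvSeg_length fila i (j-1) hi (by omega)
        rw [dif_neg (by omega : ¬ (pvSeg fila i (j-1)).length = 0)]
        rw [pvSeg_head fila i (j-1) hi hij2 (by omega),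
            pvSeg_last fila i (j-1) hi hij2 (by omega), ← hL]
        rw [pvAltLoop.eq_def, dif_pos hij2]
        simp only [Bool.false_eq_true, if_false, ← hL]
        set R2 := PySem.List.pyGetD fila (j-1) 0 with hR2
        by_cases hLR2 : L > R2
        · simp only [if_pos hLR2]
          rw [pvSeg_dropLast fila i (j-1) hi (by omega),
              pvBridge fila i (j-1-1) hi (by omega)]
        · simp only [if_neg hLR2]
          rw [pvSeg_tail fila i (j-1) hi,
              pvBridge fila (i+1) (j-1) (by omega) (by omega)]
      · -- i = j: the deque is empty after Sophia's move; A breaks, B's next call returns nothing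
        have hlen2 := pvSeg_length fila i (j-1) hi (by omega)
        rw [dif_pos (by omega : (pvSeg fila i (j-1)).length = 0)]
        rw [pvAltLoop.eq_def, dif_neg (by omega : ¬ i ≤ j - 1)]
  · -- i > j: the segment is empty; both sides return three empty lists
    have hseg : pvSeg fila i j = [] := by
      simp only [pvSeg]
      rw [show (j + 1 - i).toNat = 0 by omega]
      rfl
    rw [hseg, problema_monedas.eq_def, pvAltLoop.eq_def, dif_neg hij]
    simp
termination_by (j + 1 - i).toNat
decreasing_by all_goals omega

-- ===== VERDICT (by name: the statement is the Claim_ definition above) =====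
theorem problema_monedas_spec : Claim_equal_problema_monedas := by
  intro fila _
  unfold Spec_problema_monedas problema_monedas_alt
  rw [PySem.List.len_eq]
  rw [← pvBridge fila 0 ((fila.length : Int) - 1) le_rfl (by omega), pvSeg_eq_self]
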